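-- pv_equiv track=rewrite | github.com/mohamesb/DarkWatch---Dark-Vessel-Detection-System | darkwatch/server.py | classify_ship
-- ===== SOURCE A (Python) =====
-- SHIP_TYPES = {
--     "tanker":    range(80, 90),
--     "cargo":     range(70, 80),
--     "passenger": range(60, 70),
--     "fishing":   [30],
--     "tug":       [31, 32, 52],
--     "military":  [35],
--     "sailing":   [36],
--     "pleasure":  [37],
-- }
--
-- def classify_ship(ship_type):
--     """Map AIS numeric ship type to a category string."""
--     if ship_type is None:
--         return "other"
--     t = int(ship_type)
--     for cat, codes in SHIP_TYPES.items():
--         if t in codes: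
--             return cat
--     return "other"
-- ===== SOURCE B (Python) =====
-- # B: index-first classification — decade arithmetic for the three contiguous
-- # range categories, one flat code->category table for the scattered codes;
-- # no loop over categories in the call path.
-- DECADES = ("passenger", "cargo", "tanker")
-- SMALL = {
--     30: "fishing",
--     31: "tug", 32: "tug", 52: "tug",
--     35: "military",
--     36: "sailing",
--     37: "pleasure",
-- }
--
-- def classify_ship(ship_type):
--     """Map AIS numeric ship type to a category string."""
--     if ship_type is None:
--         return "other"
--     t = int(ship_type)
--     if 60 <= t < 90:
--         return DECADES[t // 10 - 6]
--     return SMALL.get(t, "other")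
-- ===== Notes on version B (the rewrite author's own statement) =====
-- stated objective: simpler
-- what changed: Replaces the per-call scan over the SHIP_TYPES category dict with direct indexing: decade arithmetic (t//10) picks among the three contiguous range categories, and a flat code-to-category dict handles the remaining scattered codes.
import Mathlib
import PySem

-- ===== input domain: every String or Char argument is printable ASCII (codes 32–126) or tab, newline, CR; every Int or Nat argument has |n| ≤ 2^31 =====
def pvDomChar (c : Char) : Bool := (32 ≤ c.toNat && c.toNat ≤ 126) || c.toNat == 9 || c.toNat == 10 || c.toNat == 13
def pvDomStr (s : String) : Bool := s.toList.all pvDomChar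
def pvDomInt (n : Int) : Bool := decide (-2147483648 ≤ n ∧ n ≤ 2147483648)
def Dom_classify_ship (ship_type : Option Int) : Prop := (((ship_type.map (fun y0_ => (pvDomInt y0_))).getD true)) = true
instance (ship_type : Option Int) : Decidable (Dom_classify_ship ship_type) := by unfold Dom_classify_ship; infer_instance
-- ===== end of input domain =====

-- ===== PORT A =====
-- One honest line: B replaces A's per-call scan over the category table by decade
-- arithmetic plus a flat code->category lookup (objective: simpler call path).
def shipTypesA : List (String × List Int) :=
  [("tanker",    PySem.List.pyRange 80 90 1),
   ("cargo",     PySem.List.pyRange 70 80 1),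
   ("passenger", PySem.List.pyRange 60 70 1),
   ("fishing",   [30]),
   ("tug",       [31, 32, 52]),
   ("military",  [35]),
   ("sailing",   [36]),
   ("pleasure",  [37])]

def classifyLoopA (t : Int) : List (String × List Int) → String
  | [] => "other"
  | (cat, codes) :: rest => if t ∈ codes then cat else classifyLoopA t rest

def classify_ship (ship_type : Option Int) : String :=
  match ship_type with
  | none => "other"
  | some t => classifyLoopA t shipTypesA

-- ===== PORT B =====
def pvDecadesB : List String := ["passenger", "cargo", "tanker"]

def pvSmallB : PySem.Dict Int String :=
  PySem.Dict.ofList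
    [(30, "fishing"), (31, "tug"), (32, "tug"), (52, "tug"),
     (35, "military"), (36, "sailing"), (37, "pleasure")]

def classify_ship_alt (ship_type : Option Int) : String :=
  match ship_type with
  | none => "other"
  | some t =>
    if 60 ≤ t ∧ t < 90 then
      -- DECADES[t // 10 - 6]: the guard keeps the index in range, so pyGetD is exact here
      PySem.List.pyGetD pvDecadesB (PySem.Int.floordiv t 10 - 6) "other"
    else
      PySem.Dict.getD pvSmallB t "other"

-- ===== PRECONDITION & SPEC =====
def Spec_classify_ship (ship_type : Option Int) (out : String) : Prop := out = classify_ship_alt ship_type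
instance (ship_type : Option Int) (out : String) : Decidable (Spec_classify_ship ship_type out) := by unfold Spec_classify_ship; infer_instance

-- ===== CLAIM (what is proved, stated in full; the proofs are below) =====
def Claim_equal_classify_ship : Prop := ∀ (ship_type : Option Int), Dom_classify_ship ship_type → Spec_classify_ship ship_type (classify_ship ship_type)

-- ===== LEMMAS AND PROOFS =====
theorem classify_eq_decade (t : Int) (lo : Int) (q : Int)
    (hlo : lo = q * 10) (hrange : lo ≤ t ∧ t < lo + 10) :
    PySem.Int.floordiv t 10 = q := by
  rw [PySem.Int.floordiv_eq_iff_of_pos (show (0:Int) < 10 by omega)]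
  omega

theorem classify_eq_some (t : Int) :
    classifyLoopA t shipTypesA = classify_ship_alt (some t) := by
  simp only [classify_ship_alt, classifyLoopA, shipTypesA, List.mem_cons,
    List.not_mem_nil, or_false, PySem.List.mem_pyRange_one]
  by_cases h8 : 80 ≤ t ∧ t < 90
  · rw [if_pos h8, if_pos (show 60 ≤ t ∧ t < 90 by omega),
      classify_eq_decade t 80 8 (by norm_num) (by omega)]
    decide
  · rw [if_neg h8]
    by_cases h7 : 70 ≤ t ∧ t < 80
    · rw [if_pos h7, if_pos (show 60 ≤ t ∧ t < 90 by omega),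
        classify_eq_decade t 70 7 (by norm_num) (by omega)]
      decide
    · rw [if_neg h7]
      by_cases h6 : 60 ≤ t ∧ t < 70
      · rw [if_pos h6, if_pos (show 60 ≤ t ∧ t < 90 by omega),
          classify_eq_decade t 60 6 (by norm_num) (by omega)]
        decide
      · rw [if_neg h6, if_neg (show ¬ (60 ≤ t ∧ t < 90) by omega)]
        have hmk : pvSmallB = PySem.Dict.mk
            [(30, "fishing"), (31, "tug"), (32, "tug"), (52, "tug"),
             (35, "military"), (36, "sailing"), (37, "pleasure")] := by decide
        rw [hmk]
        split_ifs with ha hb hc hd he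
        · subst ha; decide
        · rcases hb with rfl | rfl | rfl <;> decide
        · subst hc; decide
        · subst hd; decide
        · subst he; decide
        · have ne : ∀ c : Int, t ≠ c → (c == t) = false := by
            intro c h; simpa using fun hc => h hc.symm
          simp [PySem.Dict.getD, PySem.Dict.get?, List.find?,
            ne 30 ha, ne 31 (fun h => hb (Or.inl h)), ne 32 (fun h => hb (Or.inr (Or.inl h))), ne 52 (fun h => hb (Or.inr (Or.inr h))),
            ne 35 hc, ne 36 hd, ne 37 he]

-- ===== VERDICT (by name: the statement is the Claim_ definition above) =====
theorem classify_ship_spec : Claim_equal_classify_ship := by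
  intro ship_type _
  unfold Spec_classify_ship
  cases ship_type with
  | none => rfl
  | some t => exact classify_eq_some t
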